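-- pv_equiv track=rewrite | github.com/zoskar/Binary_search | Inverse Factorial.py | solve
-- ===== SOURCE A (Python) =====
-- def solve(a):
--     product = 1
--     i = 1
--     while product <= a:
--         i += 1
--         product *= i
--
--         if product == a:
--             return i
--
--     return -1
-- ===== SOURCE B (Python) =====
-- def solve(a):
--     q = a
--     i = 1
--     while q > 1:
--         i += 1
--         if q % i:
--             return -1
--         q //= i
--     return i if i > 1 else -1
-- ===== Notes on version B (the rewrite author's own statement) =====
-- stated objective: alternative
-- what changed: B factors a downward by successive division (q //= i with a divisibility test) instead of A's building the factorial product upward and comparing for equality; B exits at the first non-dividing i.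
import Mathlib
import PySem

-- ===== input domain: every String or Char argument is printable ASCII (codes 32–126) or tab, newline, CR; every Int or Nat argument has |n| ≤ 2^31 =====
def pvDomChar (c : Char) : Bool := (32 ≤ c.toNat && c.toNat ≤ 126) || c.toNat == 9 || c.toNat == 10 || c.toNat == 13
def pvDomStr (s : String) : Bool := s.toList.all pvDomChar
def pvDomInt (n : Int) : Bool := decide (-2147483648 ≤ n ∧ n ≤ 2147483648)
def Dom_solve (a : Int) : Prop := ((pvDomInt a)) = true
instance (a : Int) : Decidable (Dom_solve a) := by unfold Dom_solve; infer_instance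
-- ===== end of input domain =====

-- B tests divisibility and shrinks a quotient instead of growing a product; return value only, same cost class.

-- ===== PORT A =====
-- A's while loop: product and i stay positive, so they are carried as Nats with
-- positivity proofs; the loop terminates because product strictly grows toward a.
def solveLoop (a : Int) (product i : Nat) (hp : 0 < product) (hi : 0 < i) : Int :=
  if (product : Int) ≤ a then
    let i' := i + 1
    let p' := product * i'
    if (p' : Int) = a then (i' : Int)
    else solveLoop a p' i' (Nat.mul_pos hp (Nat.succ_pos i)) (Nat.succ_pos i)
  else -1
termination_by (a + 1 - product).toNat
decreasing_by
  have h2 : product + 1 ≤ product * (i + 1) := by nlinarith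
  omega

def solve (a : Int) : Int := solveLoop a 1 1 Nat.one_pos Nat.one_pos

-- ===== PORT B =====
-- B's while loop: q = a stays positive once the loop is entered (a > 1), carried
-- as a Nat; it terminates because q shrinks at each exact division.
def solveAltLoop (q i : Nat) (hq : 0 < q) (hi : 0 < i) : Int :=
  if h : 1 < q then
    let i' := i + 1
    if hm : q % i' ≠ 0 then -1
    else
      solveAltLoop (q / i') i'
        (Nat.div_pos (Nat.le_of_dvd hq (Nat.dvd_of_mod_eq_zero (by omega))) (Nat.succ_pos i))
        (Nat.succ_pos i)
  else if 1 < i then (i : Int) else -1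
termination_by q
decreasing_by exact Nat.div_lt_self hq (by omega)

def solve_alt (a : Int) : Int :=
  if h : 1 < a then solveAltLoop a.toNat 1 (by omega) Nat.one_pos
  else -1

-- ===== PRECONDITION & SPEC =====
def Spec_solve (a : Int) (out : Int) : Prop := out = solve_alt a
instance (a : Int) (out : Int) : Decidable (Spec_solve a out) := by unfold Spec_solve; infer_instance

-- ===== CLAIM (what is proved, stated in full; the proofs are below) =====
def Claim_equal_solve : Prop := ∀ (a : Int), Dom_solve a → Spec_solve a (solve a)

-- ===== LEMMAS AND PROOFS =====

theorem solveLoop_found (a : Int) (n : ℕ) (ha : ((Nat.factorial n : ℕ) : Int) = a) :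
    ∀ (k i product : ℕ) (hp : 0 < product) (hi : 0 < i), i + k = n → product = Nat.factorial i → i < n →
      solveLoop a product i hp hi = n := by
  intro k
  induction k with
  | zero => intro i product hp hi hik hprod hin; omega
  | succ k ih =>
    intro i product hp hi hik hprod hin
    rw [solveLoop]
    have hilt : Nat.factorial i < Nat.factorial n := (Nat.factorial_lt hi).mpr hin
    have hle : (product : Int) ≤ a := by
      rw [← ha]; exact_mod_cast hprod ▸ hilt.le
    have hfs : product * (i+1) = Nat.factorial (i+1) := by
      rw [hprod, Nat.factorial_succ]; ring
    simp only [hle, if_true]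
    by_cases hpe : ((product * (i+1) : ℕ) : Int) = a
    · simp only [hpe, if_true]
      have h2 : Nat.factorial (i+1) = Nat.factorial n := by
        have h3 : ((product * (i+1) : ℕ) : Int) = ((Nat.factorial n : ℕ) : Int) := by rw [hpe, ha]
        rw [hfs] at h3; exact_mod_cast h3
      have : i + 1 = n := by
        by_contra hne
        rcases Nat.lt_or_ge (i+1) n with h | h
        · exact absurd h2 (Nat.ne_of_lt ((Nat.factorial_lt (Nat.succ_pos i)).mpr h))
        · omega
      simp [this]
    · simp only [hpe, if_false]
      have hne : i + 1 ≠ n := by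
        intro he
        apply hpe
        rw [hfs, he, ha]
      exact ih (i+1) (product * (i+1)) _ _ (by omega) hfs (by omega)

theorem solveLoop_notfound (a : Int) (hno : ∀ m : ℕ, 1 < m → ((Nat.factorial m : ℕ) : Int) ≠ a) :
    ∀ (N product i : ℕ) (hp : 0 < product) (hi : 0 < i), (a + 1 - product).toNat ≤ N →
      product = Nat.factorial i → 1 ≤ i →
      solveLoop a product i hp hi = -1 := by
  intro N
  induction N with
  | zero =>
    intro product i hp hi hN hprod _
    rw [solveLoop]
    have : ¬ ((product : Int) ≤ a) := by omega
    simp [this]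
  | succ N ih =>
    intro product i hp hi hN hprod hi1
    rw [solveLoop]
    by_cases hle : (product : Int) ≤ a
    · have hpe : ¬ (((product * (i+1) : ℕ) : Int) = a) := by
        have hfs : product * (i+1) = Nat.factorial (i+1) := by
          rw [hprod, Nat.factorial_succ]; ring
        rw [hfs]; exact hno (i+1) (by omega)
      simp only [hle, if_true, hpe, if_false]
      apply ih
      · have h2 : product + 1 ≤ product * (i + 1) := by nlinarith
        omega
      · rw [hprod, Nat.factorial_succ]; ring
      · omega
    · simp [hle]

theorem solveAltLoop_found (n : ℕ) (hn : 1 < n) :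
    ∀ (k i q : ℕ) (hq : 0 < q) (hi : 0 < i), i + k = n → q * Nat.factorial i = Nat.factorial n →
      solveAltLoop q i hq hi = n := by
  intro k
  induction k with
  | zero =>
    intro i q hq hi hik hfac
    have hin : i = n := by omega
    subst hin
    have hq1 : q = 1 := by
      have := Nat.factorial_pos i
      have : q * Nat.factorial i = 1 * Nat.factorial i := by rw [hfac, one_mul]
      exact Nat.eq_of_mul_eq_mul_right (Nat.factorial_pos i) this
    rw [solveAltLoop]
    simp [hq1, hn]
  | succ k ih =>
    intro i q hq hi hik hfac
    have hin : i < n := by omega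
    have hdvd : (i + 1) ∣ q := by
      have h1 : Nat.factorial (i+1) ∣ Nat.factorial n := Nat.factorial_dvd_factorial (by omega)
      rw [← hfac, Nat.factorial_succ, mul_comm (i+1) (Nat.factorial i)] at h1
      have h2 : Nat.factorial i * (i+1) ∣ Nat.factorial i * q := by
        rw [mul_comm (Nat.factorial i) q]; exact h1
      exact (mul_dvd_mul_iff_left (Nat.factorial_pos i).ne').mp h2
    have hq1 : 1 < q := by
      rcases Nat.lt_or_ge 1 q with h | h
      · exact h
      · exfalso
        have hq1' : q = 1 := by omega
        subst hq1'
        rw [one_mul] at hfac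
        exact absurd hfac (Nat.ne_of_lt ((Nat.factorial_lt hi).mpr hin))
    rw [solveAltLoop]
    have hmod : ¬ (q % (i+1) ≠ 0) := by simp [Nat.mod_eq_zero_of_dvd hdvd]
    simp only [hq1, dif_pos, hmod, dite_false]
    have hqpos' : 0 < q / (i+1) := Nat.div_pos (Nat.le_of_dvd (by omega) hdvd) (by omega)
    have hfac' : q / (i+1) * Nat.factorial (i+1) = Nat.factorial n := by
      rw [Nat.factorial_succ, ← mul_assoc, Nat.div_mul_cancel hdvd, hfac]
    exact ih (i+1) (q / (i+1)) hqpos' (by omega) (by omega) hfac'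

theorem solveAltLoop_notfound :
    ∀ (q i : ℕ) (hq : 0 < q) (hi : 0 < i), 1 < q → (∀ m : ℕ, i < m → q * Nat.factorial i ≠ Nat.factorial m) →
      solveAltLoop q i hq hi = -1 := by
  intro q
  induction q using Nat.strong_induction_on with
  | _ q ihq =>
    intro i hq hi hq1 hno
    rw [solveAltLoop]
    by_cases hmod : q % (i+1) ≠ 0
    · simp [hq1, hmod]
    · simp only [hq1, dif_pos, hmod, dite_false]
      have hdvd : (i+1) ∣ q := Nat.dvd_of_mod_eq_zero (by omega)
      have hqpos : 0 < q / (i+1) := Nat.div_pos (Nat.le_of_dvd (by omega) hdvd) (by omega)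
      have hne1 : q / (i+1) ≠ 1 := by
        intro he
        have hq'' : q = i + 1 := by
          have h := Nat.div_mul_cancel hdvd
          rw [he, one_mul] at h
          exact h.symm
        apply hno (i+1) (by omega)
        rw [hq'', ← Nat.factorial_succ]
      apply ihq (q / (i+1)) (Nat.div_lt_self (by omega) (by omega)) (i+1) hqpos (by omega) (by omega)
      intro m hm
      have hrw : q / (i+1) * Nat.factorial (i+1) = q * Nat.factorial i := by
        rw [Nat.factorial_succ, ← mul_assoc, Nat.div_mul_cancel hdvd]
      rw [hrw]
      exact hno m (by omega)

-- ===== VERDICT (by name: the statement is the Claim_ definition above) =====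
theorem solve_spec : Claim_equal_solve := by
  intro a _
  unfold Spec_solve solve solve_alt
  by_cases hex : ∃ n : ℕ, 1 < n ∧ ((Nat.factorial n : ℕ) : Int) = a
  · obtain ⟨n, hn, ha⟩ := hex
    have ha2 : 1 < a := by
      rw [← ha]
      have h2 : 2 ≤ Nat.factorial n := by
        calc 2 = Nat.factorial 2 := rfl
        _ ≤ Nat.factorial n := Nat.factorial_le hn
      exact_mod_cast h2
    rw [dif_pos ha2]
    have hA : solveLoop a 1 1 Nat.one_pos Nat.one_pos = n :=
      solveLoop_found a n ha (n-1) 1 1 Nat.one_pos Nat.one_pos (by omega) (by decide) (by omega)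
    have htn : a.toNat = Nat.factorial n := by rw [← ha]; exact Int.toNat_natCast _
    have hB : solveAltLoop a.toNat 1 (by omega) Nat.one_pos = n :=
      solveAltLoop_found n hn (n-1) 1 a.toNat (by omega) Nat.one_pos (by omega)
        (by rw [htn, Nat.factorial_one, mul_one])
    rw [hA, hB]
  · push Not at hex
    have hno : ∀ m : ℕ, 1 < m → ((Nat.factorial m : ℕ) : Int) ≠ a := hex
    have hA : solveLoop a 1 1 Nat.one_pos Nat.one_pos = -1 :=
      solveLoop_notfound a hno (a + 1 - ((1:ℕ):Int)).toNat 1 1 Nat.one_pos Nat.one_pos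
        (le_refl _) (by decide) (le_refl 1)
    rw [hA]
    by_cases ha2 : 1 < a
    · rw [dif_pos ha2]
      have hB : solveAltLoop a.toNat 1 (by omega) Nat.one_pos = -1 := by
        apply solveAltLoop_notfound a.toNat 1 (by omega) Nat.one_pos (by omega)
        intro m hm
        rw [Nat.factorial_one, mul_one]
        intro he
        apply hno m hm
        rw [← he]
        omega
      rw [hB]
    · rw [dif_neg ha2]
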